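-- pv_equiv track=rewrite | github.com/Interesting-study/Algorithm | 이것이코테/무지의 먹방 라이브.py | solution
-- ===== SOURCE A (Python) =====
-- import heapq
--
-- def solution(food_times, k):
--
--     if sum(food_times) <= k:
--         return -1
--
--     new_food = []
--     for i in range(len(food_times)):
--         # [음식시간, 순서]
--         heapq.heappush(new_food, (food_times[i], i+1))
--
--     all_eating_time = 0
--     previous = 0
--     length = len(new_food)
--
--     while all_eating_time + ((new_food[0][0] - previous) * length) <= k:
--         now = heapq.heappop(new_food)[0]
--         all_eating_time += (now - previous) * length
--         length -= 1
--         previous = now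
--
--     result = sorted(new_food, key = lambda x: x[1])
--     return result[(k - all_eating_time) % length][1]
-- ===== SOURCE B (Python) =====
-- def solution(food_times, k):
--     if sum(food_times) <= k:
--         return -1
--     arr = sorted((t, i + 1) for i, t in enumerate(food_times))
--     total = 0
--     prev = 0
--     n = len(arr)
--     i = 0
--     while total + (arr[i][0] - prev) * (n - i) <= k:
--         total += (arr[i][0] - prev) * (n - i)
--         prev = arr[i][0]
--         i += 1
--     rest = sorted(arr[i:], key=lambda x: x[1])
--     return rest[(k - total) % (n - i)][1]
-- ===== Notes on version B (the rewrite author's own statement) =====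
-- stated objective: simpler
-- what changed: B replaces A's incremental binary heap (heapq push per element, pop per loop step) by one up-front sort of the (time, index) pairs walked with an advancing suffix pointer; the Pre_ excludes only the empty list with k < 0, where Python A raises IndexError.
import Mathlib
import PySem

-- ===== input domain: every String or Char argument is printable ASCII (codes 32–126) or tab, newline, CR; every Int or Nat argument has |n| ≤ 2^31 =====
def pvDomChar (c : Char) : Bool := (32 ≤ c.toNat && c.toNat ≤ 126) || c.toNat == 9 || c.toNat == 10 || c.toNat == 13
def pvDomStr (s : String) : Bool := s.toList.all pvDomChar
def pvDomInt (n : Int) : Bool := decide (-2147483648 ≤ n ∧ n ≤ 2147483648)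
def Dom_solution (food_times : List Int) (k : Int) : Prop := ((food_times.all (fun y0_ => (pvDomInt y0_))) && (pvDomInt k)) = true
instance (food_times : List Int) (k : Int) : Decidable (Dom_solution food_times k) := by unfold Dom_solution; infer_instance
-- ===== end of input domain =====

-- B replaces A's heapq simulation by one up-front sort of the (time, index) pairs walked with a suffix pointer; same result, simpler structure.

-- ===== PORT A =====
-- Python tuple comparison (t, i) < (t', i') on int pairs; exact
def pairLt (a b : Int × Int) : Bool :=
  decide (a.1 < b.1) || (decide (a.1 = b.1) && decide (a.2 < b.2))

-- heapq._siftdown(heap, startpos, pos) with newitem = heap[pos], step for step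
-- (positions are Nat: Python's are nonnegative ints here; heap[j] = getD in range;
--  fuel is a structural bound on the loop: every call passes fuel >= pos, and the
--  loop shrinks pos each round, so the 0-fuel arm (pos = 0 <= startpos there) is the
--  loop's normal exit action; exact)
def siftdown (heap : List (Int × Int)) (startpos pos : Nat) (newitem : Int × Int)
    (fuel : Nat) : List (Int × Int) :=
  match fuel with
  | 0 => heap.set pos newitem
  | fuel' + 1 =>
    if startpos < pos then
      if pairLt newitem (heap.getD ((pos - 1) / 2) (0, 0)) then
        siftdown (heap.set pos (heap.getD ((pos - 1) / 2) (0, 0))) startpos ((pos - 1) / 2)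
          newitem fuel'
      else heap.set pos newitem
    else heap.set pos newitem

-- heapq.heappush: heap.append(item); _siftdown(heap, 0, len(heap)-1); exact
def heappush (heap : List (Int × Int)) (item : Int × Int) : List (Int × Int) :=
  siftdown (heap ++ [item]) 0 heap.length item heap.length

-- heapq._siftup(heap, pos) (endpos = len(heap), constant: set preserves length;
--  fuel bounds the loop: every call passes fuel with len <= childpos + fuel and childpos
--  grows each round, so the 0-fuel arm (childpos >= len there) is the loop's exit
--  action, the trailing _siftdown; exact)
def siftup (heap : List (Int × Int)) (startpos pos childpos : Nat) (newitem : Int × Int)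
    (fuel : Nat) : List (Int × Int) :=
  match fuel with
  | 0 => siftdown heap startpos pos newitem pos
  | fuel' + 1 =>
    if childpos < heap.length then
      if childpos + 1 < heap.length
          && !(pairLt (heap.getD childpos (0, 0)) (heap.getD (childpos + 1) (0, 0))) then
        siftup (heap.set pos (heap.getD (childpos + 1) (0, 0))) startpos (childpos + 1)
          (2 * (childpos + 1) + 1) newitem fuel'
      else
        siftup (heap.set pos (heap.getD childpos (0, 0))) startpos childpos
          (2 * childpos + 1) newitem fuel'
    else siftdown heap startpos pos newitem pos

-- heapq.heappop: lastelt = heap.pop(); if heap: returnitem = heap[0]; heap[0] = lastelt; _siftup(heap, 0); exact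
def heappop (heap : List (Int × Int)) : (Int × Int) × List (Int × Int) :=
  match heap with
  | [] => ((0, 0), [])    -- heap.pop() raises IndexError on []; excluded by Pre_
  | x :: t =>
    let lastelt := (x :: t).getLast (List.cons_ne_nil x t)
    match (x :: t).dropLast with
    | [] => (lastelt, [])
    | r0 :: rt => (r0, siftup ((r0 :: rt).set 0 lastelt) 0 0 1 lastelt (r0 :: rt).length)

-- the while loop of A; the inner [] case is Python's IndexError on new_food[0], excluded
-- by Pre_ (fuel = len(heap) at every call, and each pop shrinks the heap by one, so the
-- 0-fuel arm is only reached with the empty heap, the same IndexError case)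
def eatLoop (k : Int) (heap : List (Int × Int)) (all_eating previous length : Int)
    (fuel : Nat) : Int :=
  match fuel with
  | 0 => 0
  | fuel' + 1 =>
    match heap with
    | [] => 0
    | top :: rest =>
      if all_eating + (top.1 - previous) * length ≤ k then
        let p := heappop (top :: rest)
        eatLoop k p.2 (all_eating + (p.1.1 - previous) * length) p.1.1 (length - 1) fuel'
      else
        (PySem.List.pyGetD (PySem.List.sorted (top :: rest) (fun x => x.2))
          (PySem.Int.mod (k - all_eating) length) (0, 0)).2

def solution (food_times : List Int) (k : Int) : Int :=
  if food_times.sum ≤ k then -1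
  else
    let new_food := (PySem.List.pyRange 0 (food_times.length : Int)).foldl
      (fun h i => heappush h (PySem.List.pyGetD food_times i 0, i + 1)) []
    eatLoop k new_food 0 0 (new_food.length : Int) new_food.length

-- ===== PORT B =====
-- the while loop of B over the suffix arr[i:]; the [] case is Python's IndexError on arr[i], excluded by Pre_
def eatLoopB (k : Int) (arr : List (Int × Int)) (total prev : Int) : Int :=
  match arr with
  | [] => 0
  | x :: rs =>
    if total + (x.1 - prev) * ((rs.length : Int) + 1) ≤ k then
      eatLoopB k rs (total + (x.1 - prev) * ((rs.length : Int) + 1)) x.1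
    else
      (PySem.List.pyGetD (PySem.List.sorted (x :: rs) (fun x => x.2))
        (PySem.Int.mod (k - total) ((rs.length : Int) + 1)) (0, 0)).2

def solution_alt (food_times : List Int) (k : Int) : Int :=
  if food_times.sum ≤ k then -1
  else
    let arr := PySem.List.sorted2
      ((PySem.List.enumerate food_times).map (fun p => (p.2, p.1 + 1)))
      (fun x => x.1) (fun x => x.2)
    eatLoopB k arr 0 0

-- ===== PRECONDITION & SPEC =====
-- Pre_ excludes only the empty list with k < 0: there Python A (and Python B) raise IndexError.
def Pre_solution (food_times : List Int) (k : Int) : Prop := food_times ≠ [] ∨ 0 ≤ k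
instance (food_times : List Int) (k : Int) : Decidable (Pre_solution food_times k) := by
  unfold Pre_solution; infer_instance
def pvWitness_solution : List Int × Int := ([3, 1, 2], 5)
def Spec_solution (food_times : List Int) (k : Int) (out : Int) : Prop := out = solution_alt food_times k
instance (food_times : List Int) (k : Int) (out : Int) : Decidable (Spec_solution food_times k out) := by
  unfold Spec_solution; infer_instance

-- ===== CLAIM (what is proved, stated in full; the proofs are below) =====
def Claim_equal_solution : Prop := ∀ (food_times : List Int) (k : Int), Dom_solution food_times k → Pre_solution food_times k → Spec_solution food_times k (solution food_times k)

-- ===== LEMMAS AND PROOFS =====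

-- the strict lexicographic order Python uses on the (time, index) tuples, as a Prop
def PLt (a b : Int × Int) : Prop := a.1 < b.1 ∨ (a.1 = b.1 ∧ a.2 < b.2)
def PLe (a b : Int × Int) : Prop := ¬ PLt b a

theorem pairLt_iff (a b : Int × Int) : pairLt a b = true ↔ PLt a b := by
  simp [pairLt, PLt]

theorem PLe_refl (a : Int × Int) : PLe a a := by
  obtain ⟨a1, a2⟩ := a; simp only [PLe, PLt]; omega

theorem PLt_le {a b : Int × Int} (h : PLt a b) : PLe a b := by
  obtain ⟨a1, a2⟩ := a; obtain ⟨b1, b2⟩ := b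
  simp only [PLe, PLt] at *; omega

theorem PLe_of_not_lt {a b : Int × Int} (h : ¬ PLt a b) : PLe b a := h

theorem PLe_trans {a b c : Int × Int} (h1 : PLe a b) (h2 : PLe b c) : PLe a c := by
  obtain ⟨a1, a2⟩ := a; obtain ⟨b1, b2⟩ := b; obtain ⟨c1, c2⟩ := c
  simp only [PLe, PLt] at *; omega

theorem PLe_antisymm {a b : Int × Int} (h1 : PLe a b) (h2 : PLe b a) : a = b := by
  obtain ⟨a1, a2⟩ := a; obtain ⟨b1, b2⟩ := b
  simp only [PLe, PLt, Prod.mk.injEq] at *; omega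

-- getD facts used throughout (heap cells are read with default (0,0), always in range)
theorem gd_eq_getElem (l : List (Int × Int)) (i : Nat) (h : i < l.length) :
    l.getD i (0, 0) = l[i] := by
  simp [List.getD_eq_getElem?_getD, List.getElem?_eq_getElem h]

theorem gd_set_self (l : List (Int × Int)) (i : Nat) (v : Int × Int) (h : i < l.length) :
    (l.set i v).getD i (0, 0) = v := by
  simp [List.getD_eq_getElem?_getD, h]

theorem gd_set_ne (l : List (Int × Int)) (i j : Nat) (v : Int × Int) (h : i ≠ j) :
    (l.set i v).getD j (0, 0) = l.getD j (0, 0) := by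
  simp [List.getD_eq_getElem?_getD, List.getElem?_set_ne h]

-- the binary-heap shape invariant: every cell is ≥ its parent
def HeapInv (l : List (Int × Int)) : Prop :=
  ∀ c, 0 < c → c < l.length → PLe (l.getD ((c - 1) / 2) (0, 0)) (l.getD c (0, 0))

theorem root_le (l : List (Int × Int)) (hinv : HeapInv l) :
    ∀ c, c < l.length → PLe (l.getD 0 (0, 0)) (l.getD c (0, 0)) := by
  intro c
  induction c using Nat.strong_induction_on with
  | _ c ih =>
    intro hc
    rcases Nat.eq_zero_or_pos c with h0 | h0
    · subst h0; exact PLe_refl _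
    · exact PLe_trans (ih ((c - 1) / 2) (by omega) (by omega)) (hinv c h0 hc)

theorem root_le_mem (l : List (Int × Int)) (hinv : HeapInv l) {y : Int × Int} (hy : y ∈ l) :
    PLe (l.getD 0 (0, 0)) y := by
  obtain ⟨i, hi, rfl⟩ := List.mem_iff_getElem.mp hy
  rw [← gd_eq_getElem l i hi]
  exact root_le l hinv i hi

-- moving l[b] into slot a and then overwriting slot b is, up to order, just writing into slot a
theorem set_set_perm (l : List (Int × Int)) (a b : Nat) (v : Int × Int)
    (ha : a < l.length) (hb : b < l.length) (hab : a ≠ b) :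
    ((l.set a (l.getD b (0, 0))).set b v).Perm (l.set a v) := by
  rw [List.perm_iff_count]
  intro y
  rw [gd_eq_getElem l b hb]
  rw [List.count_set (by simpa using hb), List.count_set ha, List.count_set ha,
    List.getElem_set_ne (by omega)]
  have hcnt : (if (l[a] == y) = true then 1 else 0) ≤ List.count y l := by
    split
    · next h => exact List.count_pos_iff.mpr (by rw [← eq_of_beq h]; exact List.getElem_mem ha)
    · omega
  omega

theorem siftdown_length (fuel : Nat) : ∀ (heap : List (Int × Int)) (st pos : Nat)
    (x : Int × Int), (siftdown heap st pos x fuel).length = heap.length := by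
  induction fuel with
  | zero => intro heap st pos x; simp [siftdown]
  | succ f ih =>
    intro heap st pos x
    simp only [siftdown]
    split_ifs <;> simp [ih]

theorem siftup_length (fuel : Nat) : ∀ (heap : List (Int × Int)) (st pos childpos : Nat)
    (x : Int × Int), (siftup heap st pos childpos x fuel).length = heap.length := by
  induction fuel with
  | zero => intro heap st pos childpos x; simp [siftup, siftdown_length]
  | succ f ih =>
    intro heap st pos childpos x
    simp only [siftup]
    split_ifs <;> simp [ih, siftdown_length]

theorem heappop_snd_length (x : Int × Int) (t : List (Int × Int)) :
    ((heappop (x :: t)).2).length = t.length := by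
  rw [heappop]
  cases h : (x :: t).dropLast with
  | nil =>
    have ht : t.length = 0 := by simpa using congrArg List.length h
    simp [ht]
  | cons r0 rt =>
    have ht := congrArg List.length h
    simp only [List.length_dropLast, List.length_cons, Nat.add_sub_cancel] at ht
    simp [siftup_length, ← ht]

-- invariant carried by CPython's _siftdown: heap shape holds everywhere except around the
-- hole at pos, the children of the hole dominate the incoming item, and they dominate the
-- hole's parent as well
def InvD (l : List (Int × Int)) (pos : Nat) (x : Int × Int) : Prop :=
  (∀ c, 0 < c → c < l.length → c ≠ pos → (c - 1) / 2 ≠ pos →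
    PLe (l.getD ((c - 1) / 2) (0, 0)) (l.getD c (0, 0))) ∧
  (∀ c, 0 < c → c < l.length → (c - 1) / 2 = pos → PLe x (l.getD c (0, 0))) ∧
  (0 < pos → ∀ c, 0 < c → c < l.length → (c - 1) / 2 = pos →
    PLe (l.getD ((pos - 1) / 2) (0, 0)) (l.getD c (0, 0)))

theorem gd_set (l : List (Int × Int)) (i j : Nat) (v : Int × Int) (hi : i < l.length) :
    (l.set i v).getD j (0, 0) = if j = i then v else l.getD j (0, 0) := by
  by_cases h : j = i
  · subst h; rw [if_pos rfl]; exact gd_set_self _ _ _ hi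
  · rw [if_neg h]; exact gd_set_ne _ _ _ _ (Ne.symm h)

-- placing the item at the root when the hole has climbed to position 0
theorem siftdown_done_inv (l : List (Int × Int)) (x : Int × Int) (hlen : 0 < l.length)
    (hinv : InvD l 0 x) : HeapInv (l.set 0 x) := by
  obtain ⟨h1, h2, h3⟩ := hinv
  intro c hc0 hclen
  simp only [List.length_set] at hclen
  rw [gd_set l 0 ((c - 1) / 2) _ hlen, gd_set l 0 c _ hlen]
  by_cases hpar : (c - 1) / 2 = 0
  · rw [if_pos hpar, if_neg (show ¬c = 0 by omega)]
    exact h2 c hc0 hclen hpar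
  · rw [if_neg hpar, if_neg (show ¬c = 0 by omega)]
    exact h1 c hc0 hclen (by omega) hpar

theorem siftdown_inv : ∀ (fuel pos : Nat) (l : List (Int × Int)) (x : Int × Int),
    pos ≤ fuel → pos < l.length → InvD l pos x → HeapInv (siftdown l 0 pos x fuel) := by
  intro fuel
  induction fuel with
  | zero =>
    intro pos l x hf hlen hinv
    have hp0 : pos = 0 := by omega
    subst hp0
    simp only [siftdown]
    exact siftdown_done_inv l x hlen hinv
  | succ f ih =>
    intro pos l x hf hlen hinv
    obtain ⟨h1, h2, h3⟩ := hinv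
    simp only [siftdown]
    by_cases hp : 0 < pos
    · rw [if_pos hp]
      by_cases hcmp : pairLt x (l.getD ((pos - 1) / 2) (0, 0)) = true
      · rw [if_pos hcmp]
        have hplt : PLt x (l.getD ((pos - 1) / 2) (0, 0)) := (pairLt_iff _ _).mp hcmp
        apply ih ((pos - 1) / 2) _ x (by omega) (by simp; omega)
        refine ⟨?_, ?_, ?_⟩
        · intro c hc0 hclen hcne hpne
          simp only [List.length_set] at hclen
          rw [gd_set l pos ((c - 1) / 2) _ hlen, gd_set l pos c _ hlen]
          by_cases hc : c = pos
          · exact absurd (by omega) hpne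
          rw [if_neg hc]
          by_cases hpp2 : (c - 1) / 2 = pos
          · rw [if_pos hpp2]
            exact h3 hp c hc0 hclen hpp2
          · rw [if_neg hpp2]
            exact h1 c hc0 hclen hc hpp2
        · intro c hc0 hclen hpar
          simp only [List.length_set] at hclen
          rw [gd_set l pos c _ hlen]
          by_cases hc : c = pos
          · rw [if_pos hc]
            exact PLt_le hplt
          · rw [if_neg hc]
            exact PLe_trans (PLt_le hplt) (hpar ▸ h1 c hc0 hclen hc (by omega))
        · intro hpp0 c hc0 hclen hpar
          simp only [List.length_set] at hclen
          rw [gd_set l pos (((pos - 1) / 2 - 1) / 2) _ hlen, if_neg (by omega),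
            gd_set l pos c _ hlen]
          have hedge : PLe (l.getD (((pos - 1) / 2 - 1) / 2) (0, 0))
              (l.getD ((pos - 1) / 2) (0, 0)) :=
            h1 ((pos - 1) / 2) hpp0 (by omega) (by omega) (by omega)
          by_cases hc : c = pos
          · rw [if_pos hc]
            exact hedge
          · rw [if_neg hc]
            exact PLe_trans hedge (hpar ▸ h1 c hc0 hclen hc (by omega))
      · rw [if_neg hcmp]
        intro c hc0 hclen
        simp only [List.length_set] at hclen
        rw [gd_set l pos ((c - 1) / 2) _ hlen, gd_set l pos c _ hlen]
        by_cases hc : c = pos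
        · subst hc
          rw [if_pos rfl, if_neg (by omega)]
          exact PLe_of_not_lt (fun hl => hcmp ((pairLt_iff _ _).mpr hl))
        · rw [if_neg hc]
          by_cases hpar : (c - 1) / 2 = pos
          · rw [if_pos hpar]
            exact h2 c hc0 hclen hpar
          · rw [if_neg hpar]
            exact h1 c hc0 hclen hc hpar
    · rw [if_neg hp]
      have hp0 : pos = 0 := by omega
      subst hp0
      exact siftdown_done_inv l x hlen ⟨h1, h2, h3⟩

theorem siftdown_perm : ∀ (fuel pos : Nat) (l : List (Int × Int)) (st : Nat)
    (x : Int × Int), pos ≤ fuel → pos < l.length →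
    (siftdown l st pos x fuel).Perm (l.set pos x) := by
  intro fuel
  induction fuel with
  | zero =>
    intro pos l st x hf hlen
    simp only [siftdown]
    exact List.Perm.refl _
  | succ f ih =>
    intro pos l st x hf hlen
    simp only [siftdown]
    split
    · split
      · next hst hcmp =>
        refine List.Perm.trans (ih ((pos - 1) / 2) _ st x (by omega) (by simp; omega)) ?_
        exact set_set_perm l pos ((pos - 1) / 2) x hlen (by omega) (by omega)
      · exact List.Perm.refl _
    · exact List.Perm.refl _

-- invariant carried by CPython's _siftup: heap shape away from the hole at pos, plus the
-- hole's children dominating the hole's parent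
def invU1 (l : List (Int × Int)) (pos : Nat) : Prop :=
  ∀ c, 0 < c → c < l.length → c ≠ pos → (c - 1) / 2 ≠ pos →
    PLe (l.getD ((c - 1) / 2) (0, 0)) (l.getD c (0, 0))
def invU2 (l : List (Int × Int)) (pos : Nat) : Prop :=
  0 < pos → ∀ c, 0 < c → c < l.length → (c - 1) / 2 = pos →
    PLe (l.getD ((pos - 1) / 2) (0, 0)) (l.getD c (0, 0))

theorem siftup_shift (l : List (Int × Int)) (pos cp : Nat) (hp : pos < l.length)
    (hcp : cp = 2 * pos + 1 ∨ cp = 2 * pos + 2) (hcplen : cp < l.length)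
    (h1 : invU1 l pos) (h2 : invU2 l pos)
    (hmin : ∀ c, 0 < c → c < l.length → (c - 1) / 2 = pos →
      PLe (l.getD cp (0, 0)) (l.getD c (0, 0))) :
    invU1 (l.set pos (l.getD cp (0, 0))) cp ∧ invU2 (l.set pos (l.getD cp (0, 0))) cp := by
  constructor
  · intro c hc0 hclen hcne hpne
    simp only [List.length_set] at hclen
    rw [gd_set l pos ((c - 1) / 2) _ hp, gd_set l pos c _ hp]
    by_cases hc : c = pos
    · subst hc
      rw [if_pos rfl, if_neg (show ¬(c - 1) / 2 = c by omega)]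
      exact h2 (by omega) cp (by omega) hcplen (by omega)
    · rw [if_neg hc]
      by_cases hpp : (c - 1) / 2 = pos
      · rw [if_pos hpp]
        exact hmin c hc0 hclen hpp
      · rw [if_neg hpp]
        exact h1 c hc0 hclen hc hpp
  · intro hcp0 c hc0 hclen hpar
    simp only [List.length_set] at hclen
    rw [gd_set l pos ((cp - 1) / 2) _ hp, gd_set l pos c _ hp,
      if_pos (show (cp - 1) / 2 = pos by omega), if_neg (show ¬c = pos by omega)]
    exact hpar ▸ h1 c hc0 hclen (by omega) (by omega)

theorem siftup_inv : ∀ (fuel : Nat) (l : List (Int × Int)) (pos : Nat) (x : Int × Int),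
    l.length ≤ pos + fuel → pos < l.length → invU1 l pos → invU2 l pos →
    HeapInv (siftup l 0 pos (2 * pos + 1) x fuel) := by
  intro fuel
  induction fuel with
  | zero => intro l pos x hf hp _ _; omega
  | succ f ih =>
    intro l pos x hf hp h1 h2
    simp only [siftup]
    by_cases hc : 2 * pos + 1 < l.length
    · rw [if_pos hc]
      split
      · next hsel =>
        simp only [Bool.and_eq_true, decide_eq_true_eq, Bool.not_eq_eq_eq_not,
          Bool.not_true] at hsel
        obtain ⟨hlen2, hnlt⟩ := hsel
        have hmin : ∀ c, 0 < c → c < l.length → (c - 1) / 2 = pos →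
            PLe (l.getD (2 * pos + 1 + 1) (0, 0)) (l.getD c (0, 0)) := by
          intro c hc0 hclen hpar
          have hcc : c = 2 * pos + 1 ∨ c = 2 * pos + 1 + 1 := by omega
          rcases hcc with rfl | rfl
          · exact PLe_of_not_lt (fun hl => by
              rw [(pairLt_iff _ _).mpr hl] at hnlt; simp at hnlt)
          · exact PLe_refl _
        obtain ⟨h1', h2'⟩ := siftup_shift l pos (2 * pos + 1 + 1) hp (by omega) hlen2 h1 h2
          (by simpa using hmin)
        have := ih (l.set pos (l.getD (2 * pos + 1 + 1) (0, 0))) (2 * pos + 1 + 1) x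
          (by simp; omega) (by simp; omega) h1' h2'
        simpa [Nat.mul_add] using this
      · next hsel =>
        have hmin : ∀ c, 0 < c → c < l.length → (c - 1) / 2 = pos →
            PLe (l.getD (2 * pos + 1) (0, 0)) (l.getD c (0, 0)) := by
          intro c hc0 hclen hpar
          have hcc : c = 2 * pos + 1 ∨ c = 2 * pos + 1 + 1 := by omega
          rcases hcc with rfl | rfl
          · exact PLe_refl _
          · cases hpb : pairLt (l.getD (2 * pos + 1) (0, 0))
                (l.getD (2 * pos + 1 + 1) (0, 0)) with
            | true => exact PLt_le ((pairLt_iff _ _).mp hpb)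
            | false => exact absurd (by rw [Bool.and_eq_true, hpb]; simp [hclen]) hsel
        obtain ⟨h1', h2'⟩ := siftup_shift l pos (2 * pos + 1) hp (by omega) hc h1 h2 hmin
        exact ih (l.set pos (l.getD (2 * pos + 1) (0, 0))) (2 * pos + 1) x
          (by simp; omega) (by simp; omega) h1' h2'
    · rw [if_neg hc]
      apply siftdown_inv pos pos l x (Nat.le_refl pos) hp
      exact ⟨h1, fun c hc0 hclen hpar => absurd hpar (by omega), h2⟩

theorem siftup_perm : ∀ (fuel : Nat) (l : List (Int × Int)) (st pos childpos : Nat)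
    (x : Int × Int), l.length ≤ childpos + fuel → pos < childpos → pos < l.length →
    (siftup l st pos childpos x fuel).Perm (l.set pos x) := by
  intro fuel
  induction fuel with
  | zero =>
    intro l st pos childpos x hf hpc hp
    simp only [siftup]
    exact siftdown_perm pos pos l st x (Nat.le_refl pos) hp
  | succ f ih =>
    intro l st pos childpos x hf hpc hp
    simp only [siftup]
    by_cases hc : childpos < l.length
    · rw [if_pos hc]
      split
      · next hsel =>
        simp only [Bool.and_eq_true, decide_eq_true_eq] at hsel
        refine List.Perm.trans
          (ih _ st (childpos + 1) _ x (by simp; omega) (by omega) (by simp; omega)) ?_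
        exact set_set_perm l pos (childpos + 1) x hp (by omega) (by omega)
      · next hsel =>
        refine List.Perm.trans
          (ih _ st childpos _ x (by simp; omega) (by omega) (by simp; omega)) ?_
        exact set_set_perm l pos childpos x hp hc (by omega)
    · rw [if_neg hc]
      exact siftdown_perm pos pos l st x (Nat.le_refl pos) hp

theorem heappush_inv (h : List (Int × Int)) (x : Int × Int) (hinv : HeapInv h) :
    HeapInv (heappush h x) := by
  unfold heappush
  apply siftdown_inv h.length h.length (h ++ [x]) x (Nat.le_refl _) (by simp)
  refine ⟨?_, ?_, ?_⟩
  · intro c hc0 hclen hcne hpne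
    simp only [List.length_append, List.length_cons, List.length_nil] at hclen
    have hcl : c < h.length := by omega
    rw [List.getD_append _ _ _ _ (by omega), List.getD_append _ _ _ _ hcl]
    exact hinv c hc0 hcl
  · intro c hc0 hclen hpar
    simp only [List.length_append, List.length_cons, List.length_nil] at hclen
    exact absurd hpar (by omega)
  · intro hp0 c hc0 hclen hpar
    simp only [List.length_append, List.length_cons, List.length_nil] at hclen
    exact absurd hpar (by omega)

theorem heappush_perm (h : List (Int × Int)) (x : Int × Int) :
    (heappush h x).Perm (x :: h) := by
  unfold heappush
  refine List.Perm.trans (siftdown_perm h.length h.length (h ++ [x]) 0 x (Nat.le_refl _) (by simp)) ?_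
  have hset : (h ++ [x]).set h.length x = h ++ [x] := by
    rw [List.set_append, if_neg (by omega)]
    simp
  rw [hset]
  exact List.perm_append_singleton x h

theorem heappop_fst (x : Int × Int) (t : List (Int × Int)) : (heappop (x :: t)).1 = x := by
  cases t with
  | nil => rfl
  | cons y ys => simp [heappop, List.dropLast_cons₂]

theorem heappop_perm (x : Int × Int) (t : List (Int × Int)) :
    ((heappop (x :: t)).1 :: (heappop (x :: t)).2).Perm (x :: t) := by
  cases t with
  | nil => exact List.Perm.refl _
  | cons y ys =>
    simp only [heappop, List.dropLast_cons₂, List.set_cons_zero]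
    refine List.Perm.cons x ?_
    refine List.Perm.trans (siftup_perm _ _ 0 0 1 _ (by simp) (by omega) (by simp)) ?_
    rw [List.set_cons_zero]
    refine List.Perm.trans (List.perm_append_singleton _ _).symm ?_
    rw [List.getLast_cons (by simp), List.dropLast_append_getLast (by simp)]

theorem tail_getD (x y : Int × Int) (ys : List (Int × Int)) (L : Int × Int) (j : Nat)
    (hj0 : 0 < j) (hjlen : j < (y :: ys).dropLast.length + 1) :
    (L :: (y :: ys).dropLast).getD j (0, 0) = (x :: y :: ys).getD j (0, 0) := by
  obtain ⟨i, rfl⟩ : ∃ i, j = i + 1 := ⟨j - 1, by omega⟩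
  simp only [List.getD_cons_succ]
  simp only [List.length_dropLast, List.length_cons, Nat.add_sub_cancel] at hjlen
  rw [gd_eq_getElem _ i (by simp; omega), gd_eq_getElem _ i (by simp; omega),
    List.getElem_dropLast]

theorem heappop_inv (x : Int × Int) (t : List (Int × Int)) (hinv : HeapInv (x :: t)) :
    HeapInv (heappop (x :: t)).2 := by
  cases t with
  | nil =>
    intro c hc0 hclen
    simp [heappop] at hclen
  | cons y ys =>
    simp only [heappop, List.dropLast_cons₂, List.set_cons_zero]
    have hgoal := siftup_inv ((x :: (y :: ys).dropLast).length)
      ((x :: y :: ys).getLast (List.cons_ne_nil x (y :: ys)) :: (y :: ys).dropLast) 0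
      ((x :: y :: ys).getLast (List.cons_ne_nil x (y :: ys))) (by simp) (by simp) ?_ ?_
    · simpa using hgoal
    · intro c hc0 hclen hcne hpne
      simp only [List.length_cons] at hclen
      rw [tail_getD x y ys _ _ (by omega) (by omega), tail_getD x y ys _ _ hc0 (by omega)]
      exact hinv c hc0 (by simp at hclen ⊢; omega)
    · exact fun h => absurd h (lt_irrefl 0)

-- the (time, original position) pairs A pushes and B sorts
def pairsOf (ft : List Int) : List (Int × Int) :=
  (PySem.List.enumerate ft).map (fun p => (p.2, p.1 + 1))

theorem fold_push (L : List (Int × Int)) : ∀ acc, HeapInv acc →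
    HeapInv (L.foldl heappush acc) ∧ (L.foldl heappush acc).Perm (acc ++ L) := by
  induction L with
  | nil => intro acc hacc; exact ⟨hacc, by simp⟩
  | cons a L ih =>
    intro acc hacc
    simp only [List.foldl_cons]
    obtain ⟨hi, hp⟩ := ih (heappush acc a) (heappush_inv _ _ hacc)
    refine ⟨hi, hp.trans ?_⟩
    refine List.Perm.trans (List.Perm.append_right L (heappush_perm acc a)) ?_
    exact List.perm_middle.symm

theorem build_spec (ft : List Int) :
    HeapInv ((PySem.List.pyRange 0 (ft.length : Int)).foldl
      (fun h i => heappush h (PySem.List.pyGetD ft i 0, i + 1)) []) ∧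
    ((PySem.List.pyRange 0 (ft.length : Int)).foldl
      (fun h i => heappush h (PySem.List.pyGetD ft i 0, i + 1)) []).Perm (pairsOf ft) := by
  have hmap : pairsOf ft = (PySem.List.pyRange 0 (ft.length : Int)).map
      (fun j => (PySem.List.pyGetD ft j 0, j + 1)) := by
    unfold pairsOf
    rw [PySem.List.enumerate_eq_map_pyRange ft 0, List.map_map]
    rfl
  have hfold : (PySem.List.pyRange 0 (ft.length : Int)).foldl
      (fun h i => heappush h (PySem.List.pyGetD ft i 0, i + 1)) []
      = (pairsOf ft).foldl heappush [] := by
    rw [hmap, List.foldl_map]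
  rw [hfold]
  have := fold_push (pairsOf ft) [] (by intro c hc0 hclen; simp at hclen)
  simpa using this

-- the comparator sorted2 uses on (fst, snd) keys
def sLtB (a b : Int × Int) : Bool :=
  decide (a.1 < b.1) || (!decide (b.1 < a.1) && decide (a.2 < b.2))

theorem sLtB_iff (a b : Int × Int) : sLtB a b = true ↔ PLt a b := by
  obtain ⟨a1, a2⟩ := a; obtain ⟨b1, b2⟩ := b
  simp only [sLtB, PLt, Bool.or_eq_true, Bool.and_eq_true, Bool.not_eq_eq_eq_not,
    Bool.not_true, decide_eq_true_eq, decide_eq_false_iff_not]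
  omega

theorem insertBy_pairwise : ∀ (s : List (Int × Int)), s.Pairwise PLe →
    ∀ x, (PySem.List.insertBy sLtB x s).Pairwise PLe := by
  intro s
  induction s with
  | nil => intro _ x; simp [PySem.List.insertBy]
  | cons y ys ih =>
    intro hp x
    obtain ⟨hy, hys⟩ := List.pairwise_cons.mp hp
    rw [PySem.List.insertBy]
    split
    · next hxy =>
      have hxyP : PLe x y := PLt_le ((sLtB_iff _ _).mp hxy)
      refine List.pairwise_cons.mpr ⟨?_, hp⟩
      intro z hz
      rcases List.mem_cons.mp hz with rfl | hz'
      · exact hxyP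
      · exact PLe_trans hxyP (hy z hz')
    · next hxy =>
      have hyx : PLe y x := fun hl => hxy ((sLtB_iff _ _).mpr hl)
      refine List.pairwise_cons.mpr ⟨?_, ih hys x⟩
      intro z hz
      rcases (PySem.List.mem_insertBy _ _ _ _).mp hz with rfl | hz'
      · exact hyx
      · exact hy z hz'

theorem sorted2_pairwise (xs : List (Int × Int)) :
    (PySem.List.sorted2 xs (fun x => x.1) (fun x => x.2)).Pairwise PLe := by
  have hfold : PySem.List.sorted2 xs (fun x => x.1) (fun x => x.2)
      = xs.foldl (fun acc x => PySem.List.insertBy sLtB x acc) [] := rfl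
  rw [hfold]
  suffices hgen : ∀ (l acc : List (Int × Int)), acc.Pairwise PLe →
      (l.foldl (fun acc x => PySem.List.insertBy sLtB x acc) acc).Pairwise PLe from
    hgen xs [] (by simp)
  intro l
  induction l with
  | nil => intro acc h; simpa using h
  | cons a l ih =>
    intro acc h
    simp only [List.foldl_cons]
    exact ih _ (insertBy_pairwise acc h a)

theorem pairs_snd_pairwise (ft : List Int) :
    (pairsOf ft).Pairwise (fun a b => a.2 < b.2) := by
  unfold pairsOf
  rw [List.pairwise_map]
  exact (PySem.List.pairwise_lt_enumerate ft 0).imp (fun h => by omega)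

theorem snd_nodup_of_perm {s : List (Int × Int)} {ft : List Int}
    (hp : s.Perm (pairsOf ft)) : (s.map (fun z => z.2)).Nodup := by
  have hnd : ((pairsOf ft).map (fun z => z.2)).Nodup :=
    (List.pairwise_map.mpr (pairs_snd_pairwise ft)).imp (fun h => ne_of_lt h)
  exact ((hp.map _).nodup_iff).mpr hnd

theorem sorted_snd_eq {h s : List (Int × Int)} (hperm : s.Perm h)
    (hnd : (s.map (fun z => z.2)).Nodup) :
    PySem.List.sorted h (fun x => x.2) = PySem.List.sorted s (fun x => x.2) := by
  apply PySem.List.sorted_eq_of_perm_of_pairwise_lt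
  · exact (PySem.List.sorted_perm s _ false).trans hperm
  · have hle := PySem.List.sorted_pairwise (κ := Int) s (fun x => x.2)
    have hndys : ((PySem.List.sorted s (fun x => x.2) false).map (fun z => z.2)).Nodup :=
      (((PySem.List.sorted_perm s _ false).map _).nodup_iff).mpr hnd
    have hne : (PySem.List.sorted s (fun x => x.2) false).Pairwise (fun a b => a.2 ≠ b.2) :=
      List.pairwise_map.mp hndys
    exact (hle.and hne).imp (fun hab => lt_of_le_of_ne hab.1 hab.2)

theorem bridge : ∀ (n : Nat) (h s : List (Int × Int)) (total prev k : Int),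
    h.length ≤ n → HeapInv h → s.Perm h → s.Pairwise PLe →
    (s.map (fun z => z.2)).Nodup →
    eatLoop k h total prev (h.length : Int) h.length = eatLoopB k s total prev := by
  intro n
  induction n with
  | zero =>
    intro h s total prev k hn _ hperm _ _
    have hh : h = [] := by cases h <;> simp_all
    subst hh
    have hs : s = [] := by have := hperm.length_eq; cases s <;> simp_all
    subst hs
    simp [eatLoop, eatLoopB]
  | succ n ih =>
    intro h s total prev k hn hinv hperm hpw hnd
    cases h with
    | nil =>
      have hs : s = [] := by have := hperm.length_eq; cases s <;> simp_all
      subst hs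
      simp [eatLoop, eatLoopB]
    | cons top rest =>
      cases s with
      | nil => have := hperm.length_eq; simp at this
      | cons m rs =>
        have hlen_eq : rs.length = rest.length := by
          have := hperm.length_eq; simpa using this
        have hmh : m ∈ (top :: rest) := hperm.subset (List.mem_cons_self)
        have h1 : PLe top m := root_le_mem _ hinv hmh
        have htops : top ∈ m :: rs := hperm.symm.subset (List.mem_cons_self)
        have h2 : PLe m top := by
          rcases List.mem_cons.mp htops with rfl | hin
          · exact PLe_refl _
          · exact (List.pairwise_cons.mp hpw).1 top hin
        have htm : top = m := PLe_antisymm h1 h2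
        subst htm
        have hL : (((rest.length + 1 : Nat) : Int)) = (rs.length : Int) + 1 := by
          simp [hlen_eq]
        rw [show (top :: rest).length = rest.length + 1 from rfl]
        rw [eatLoop, eatLoopB]
        simp only [hL]
        by_cases hg : total + (top.1 - prev) * ((rs.length : Int) + 1) ≤ k
        · rw [if_pos hg, if_pos hg]
          have hfst : (heappop (top :: rest)).1 = top := heappop_fst top rest
          have hlenp : (((rs.length : Int) + 1) - 1)
              = (((heappop (top :: rest)).2).length : Int) := by
            rw [heappop_snd_length]; simp [hlen_eq]
          rw [hfst, hlenp,
            show rest.length = ((heappop (top :: rest)).2).length from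
              (heappop_snd_length top rest).symm]
          apply ih
          · have hn' := hn
            simp only [List.length_cons] at hn'
            rw [heappop_snd_length]
            omega
          · exact heappop_inv top rest hinv
          · have hpp := heappop_perm top rest
            rw [hfst] at hpp
            exact (hpp.trans hperm.symm).cons_inv.symm
          · exact (List.pairwise_cons.mp hpw).2
          · simp only [List.map_cons] at hnd
            exact hnd.of_cons
        · rw [if_neg hg, if_neg hg]
          rw [sorted_snd_eq hperm hnd]

theorem heapinv_nil_ok : HeapInv [] := by
  intro c hc0 hclen
  simp at hclen

-- ===== VERDICT (by name: the statement is the Claim_ definition above) =====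
theorem solution_spec : Claim_equal_solution := by
  unfold Claim_equal_solution
  intro ft k _ _
  unfold Spec_solution solution solution_alt
  by_cases hs : ft.sum ≤ k
  · rw [if_pos hs, if_pos hs]
  · rw [if_neg hs, if_neg hs]
    obtain ⟨hinv, hperm⟩ := build_spec ft
    have hpermS : (PySem.List.sorted2 ((PySem.List.enumerate ft).map (fun p => (p.2, p.1 + 1)))
        (fun x => x.1) (fun x => x.2)).Perm (pairsOf ft) :=
      PySem.List.sorted2_perm _ _ _ _
    exact bridge _ _ _ 0 0 k (le_refl _) hinv (hpermS.trans hperm.symm)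
      (sorted2_pairwise _) (snd_nodup_of_perm hpermS)
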